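-- pv_equiv track=rewrite | github.com/Kawser-nerd/CLCDSA | Source Codes/CodeJamData/11/12/17.py | get_killa_word
-- ===== SOURCE A (Python) =====
-- def find_all(str, substr):
--     out = []
--     last = str.find(substr)
--     while last != -1:
--         out.append(last)
--         last = str.find(substr, last + 1)
--     return out
--
-- def filter_by(select_word, words, letter):
--     select_appearance = find_all(select_word, letter)
--     out = []
--     for word in words:
--         if select_appearance == find_all(word, letter):
--             out.append(word)
--     # print "filtered by %s and %s -- %s" % (select_word, letter, out)
--     return out
--
-- def get_guesses(select_word, words, glist):
--     new_words = []
--     for word in words: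
--         if len(word) == len(select_word):
--             new_words.append(word)
--     return get_guesses_samewordsize(select_word, new_words, glist)
--
-- def get_guesses_samewordsize(select_word, words, glist):
--     if len(words) == 1:
--         return 0
--     letset = set()
--     for word in words:
--         letset.update(word)
--     i = 0
--     while(glist[i] not in letset):
--         i += 1
--     # print "gonna guess %s" % glist[i]
--     words = filter_by(select_word, words, glist[i])
--     mistake = glist[i] not in select_word
--     # if mistake == 1:
--     #     print "saying %s for %s would be a mistake..." % (glist[i], select_word)
--     return mistake + get_guesses_samewordsize(select_word, words, glist[i+1:])
--
-- def get_killa_word(words, glist):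
--     max_guesses = -1
--     max_word = ""
--     for word in words:
--         guesses = get_guesses(word, words, glist)
--         # print word, "requires", guesses, "guesses"
--         if guesses > max_guesses:
--             max_guesses = guesses
--             max_word = word
--     return max_word
-- ===== SOURCE B (Python) =====
-- def get_killa_word(words, glist):
--     def sig(w, c):
--         return [i for i, ch in enumerate(w) if ch == c]
--
--     def guesses(sel):
--         cands = [w for w in words if len(w) == len(sel)]
--         mistakes = 0
--         for c in glist:
--             if len(cands) == 1:
--                 break
--             letters = {ch for w in cands for ch in w}
--             if c not in letters:
--                 continue
--             s = sig(sel, c)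
--             cands = [w for w in cands if sig(w, c) == s]
--             if c not in sel:
--                 mistakes += 1
--         return mistakes
--
--     if not words:
--         return ""
--     return max(words, key=guesses)
-- ===== Notes on version B (the rewrite author's own statement) =====
-- stated objective: alternative
-- what changed: B replaces A's recursive guess-counting over sliced guess lists and its find_all while-loop scans by a single iterative loop over glist maintaining the candidate set (skip letters absent from the candidates' letter set, filter by enumerate-based position signatures, break at one candidate), and replaces the explicit running-max loop by max(words, key=guesses).
import Mathlib
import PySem

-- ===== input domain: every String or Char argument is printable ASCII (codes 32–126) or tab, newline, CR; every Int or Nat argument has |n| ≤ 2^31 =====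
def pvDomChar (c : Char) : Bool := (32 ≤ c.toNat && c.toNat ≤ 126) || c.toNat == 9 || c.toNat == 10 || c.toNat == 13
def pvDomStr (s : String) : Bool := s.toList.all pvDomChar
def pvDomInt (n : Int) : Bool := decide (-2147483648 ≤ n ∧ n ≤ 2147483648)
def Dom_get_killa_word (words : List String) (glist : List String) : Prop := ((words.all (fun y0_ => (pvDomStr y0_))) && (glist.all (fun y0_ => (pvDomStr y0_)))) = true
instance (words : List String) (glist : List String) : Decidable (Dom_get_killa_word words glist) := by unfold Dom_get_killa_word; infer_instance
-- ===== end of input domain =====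

-- B replaces A's recursive guess-counting (find_all scans, list slicing) by an iterative
-- candidate-set loop with enumerate-based letter signatures and max(key=…); same results (objective: alternative).

-- ===== PORT A =====

-- find_all(str, substr): while loop on str.find; the fuel (length+2) strictly exceeds the
-- number of iterations the Python loop can make (find from last+1 strictly increases).
def pvFindAllGo (s sub : String) : Nat → Int → List Int → List Int
  | 0, _, out => out
  | fuel + 1, last, out =>
    if last = -1 then out
    else pvFindAllGo s sub fuel (PySem.Str.findFrom s sub (last + 1) none) (out ++ [last])

def pvFindAll (s sub : String) : List Int :=
  pvFindAllGo s sub (s.toList.length + 2) (PySem.Str.find s sub) []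

-- filter_by(select_word, words, letter)
def pvFilterBy (sw : String) (ws : List String) (c : String) : List String :=
  let sa := pvFindAll sw c
  ws.foldl (fun out w => if sa = pvFindAll w c then out ++ [w] else out) []

-- letset = set(); for word in words: letset.update(word)   (elements are 1-char strings)
def pvLetset (ws : List String) : PySem.Set String :=
  ws.foldl (fun s w => PySem.Set.update s (w.toList.map (fun ch => String.singleton ch))) PySem.Set.empty

-- i = 0; while glist[i] not in letset: i += 1   (none = the IndexError Python raises)
def pvSearch (g : List String) (ls : PySem.Set String) : Option Nat :=
  match g with
  | [] => none
  | x :: r => if PySem.Set.contains ls x then some 0 else (pvSearch r ls).map (· + 1)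

theorem pvSearch_lt {g : List String} {ls : PySem.Set String} {i : Nat}
    (h : pvSearch g ls = some i) : i < g.length := by
  induction g generalizing i with
  | nil => simp [pvSearch] at h
  | cons x r ih =>
    rw [pvSearch] at h
    split at h
    · simp at h; simp only [List.length_cons]; omega
    · rw [Option.map_eq_some_iff] at h
      obtain ⟨j, hj, hji⟩ := h
      have := ih hj
      simp only [List.length_cons]; omega

-- get_guesses_samewordsize(select_word, words, glist)
def pvGSS (sw : String) (words : List String) (glist : List String) : Int :=
  if words.length = 1 then 0
  else
    let ls := pvLetset words
    match h : pvSearch glist ls with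
    | none => 0  -- Python raises IndexError here (excluded by Pre_)
    | some i =>
      let c := PySem.List.pyGetD glist (i : Int) ""
      let words' := pvFilterBy sw words c
      let mistake : Int := if PySem.Str.isIn c sw then 0 else 1
      mistake + pvGSS sw words' (PySem.List.slice glist (some ((i : Int) + 1)) none)
termination_by glist.length
decreasing_by
  have hi := pvSearch_lt h
  have : ((i : Int) + 1) = ((i + 1 : Nat) : Int) := by push_cast; ring
  rw [this, PySem.List.slice_from_natCast]
  simp [List.length_drop]; omega

-- get_guesses(select_word, words, glist)
def pvGetGuesses (sw : String) (words : List String) (glist : List String) : Int :=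
  let new_words := words.foldl (fun out w => if PySem.Str.len w = PySem.Str.len sw then out ++ [w] else out) []
  pvGSS sw new_words glist

def get_killa_word (words : List String) (glist : List String) : String :=
  (words.foldl (fun st w =>
      let guesses := pvGetGuesses w words glist
      if st.1 < guesses then (guesses, w) else st) ((-1 : Int), "")).2

-- ===== PORT B =====

-- sig(w, c) = [i for i, ch in enumerate(w) if ch == c]
def pvSig (w c : String) : List Int :=
  (PySem.List.enumerate w.toList).filterMap
    (fun p => if String.singleton p.2 = c then some p.1 else none)

-- the for-c-in-glist loop of guesses() with its break/continue
def pvLoop (sel : String) (glist : List String) (cands : List String) (mist : Int) : Int :=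
  match glist with
  | [] => mist
  | c :: rest =>
    if cands.length = 1 then mist
    else
      let letters := PySem.Set.ofList (cands.flatMap (fun w => w.toList.map (fun ch => String.singleton ch)))
      if ¬ PySem.Set.contains letters c then pvLoop sel rest cands mist
      else
        let s := pvSig sel c
        let cands' := cands.filter (fun w => pvSig w c = s)
        pvLoop sel rest cands' (mist + (if PySem.Str.isIn c sel then 0 else 1))

def pvGuesses (words glist : List String) (sel : String) : Int :=
  pvLoop sel glist (words.filter (fun w => PySem.Str.len w = PySem.Str.len sel)) 0

def get_killa_word_alt (words : List String) (glist : List String) : String :=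
  if words.isEmpty then ""
  else (PySem.List.max? words (fun sel => pvGuesses words glist sel)).getD ""

-- ===== PRECONDITION & SPEC =====

-- positions of the (single) character of g in w; used only by Pre_ (independent of both ports)
def pvPos (w g : String) : List Nat :=
  (List.range w.toList.length).filter (fun i => w.toList[i]? = g.toList[0]?)

-- Pre_ excludes exactly the inputs on which Python A raises IndexError (it runs out of guessable
-- letters): some pair of distinct same-length words is separated by no single-letter glist entry.
def Pre_get_killa_word (words : List String) (glist : List String) : Prop :=
  ∀ i ∈ List.range words.length, ∀ j ∈ List.range words.length, i ≠ j →
    (words.getD i "").toList.length = (words.getD j "").toList.length →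
    ∃ g ∈ glist, g.toList.length = 1 ∧ pvPos (words.getD i "") g ≠ pvPos (words.getD j "") g

instance (words : List String) (glist : List String) : Decidable (Pre_get_killa_word words glist) := by
  unfold Pre_get_killa_word; infer_instance

def pvWitness_get_killa_word : List String × List String := (["ab", "ac", "b"], ["a", "b", "c"])

def Spec_get_killa_word (words : List String) (glist : List String) (out : String) : Prop := out = get_killa_word_alt words glist
instance (words : List String) (glist : List String) (out : String) : Decidable (Spec_get_killa_word words glist out) := by unfold Spec_get_killa_word; infer_instance

-- ===== CLAIM (what is proved, stated in full; the proofs are below) =====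
def Claim_equal_get_killa_word : Prop := ∀ (words : List String) (glist : List String), Dom_get_killa_word words glist → Pre_get_killa_word words glist → Spec_get_killa_word words glist (get_killa_word words glist)

-- ===== LEMMAS AND PROOFS =====

-- occurrence positions of a character, structurally
def pvOcc (cs : List Char) (ch : Char) : List Nat :=
  match cs with
  | [] => []
  | a :: t => if a = ch then 0 :: (pvOcc t ch).map (· + 1) else (pvOcc t ch).map (· + 1)

theorem pvSingleton_inj (a ch : Char) : String.singleton a = String.singleton ch ↔ a = ch := by
  constructor
  · intro h; have := congrArg String.toList h; simpa using this
  · rintro rfl; rfl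

theorem pvSig_aux (ch : Char) (cs : List Char) : ∀ s : Int,
    (PySem.List.enumerate cs s).filterMap
        (fun p => if p.2 = ch then some p.1 else none)
      = (pvOcc cs ch).map (fun (j : Nat) => (s + j : Int)) := by
  induction cs with
  | nil => intro s; simp [PySem.List.enumerate, pvOcc]
  | cons a t ih =>
    intro s
    rw [PySem.List.enumerate_cons, List.filterMap_cons]
    by_cases ha : a = ch
    · subst ha
      simp only [pvOcc, ih (s + 1), if_true, List.map_cons, List.map_map, List.cons_eq_cons]
      constructor
      · push_cast; ring
      · apply List.map_congr_left; intro j _; simp only [Function.comp_apply]; push_cast; ring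
    · simp only [pvOcc, ih (s + 1)]
      simp [ha]
      intros; ring

theorem pvSig_singleton (w : String) (ch : Char) :
    pvSig w (String.singleton ch) = (pvOcc w.toList ch).map (fun (j : Nat) => (j : Int)) := by
  rw [pvSig]
  have : (fun (p : Int × Char) => if String.singleton p.2 = String.singleton ch then some p.1 else none)
      = (fun p => if p.2 = ch then some p.1 else none) := by
    funext p; simp [pvSingleton_inj]
  rw [this, pvSig_aux]
  apply List.map_congr_left; intro j _; ring

theorem pvPrefix_drop (l : List Char) (a : Char) (i : Nat) :
    [a] <+: l.drop i ↔ l[i]? = some a := by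
  rw [← List.head?_drop]
  cases h : l.drop i with
  | nil => simp
  | cons b t => simp [List.cons_prefix_cons, eq_comm]

theorem pvOcc_nil_of_not_mem {cs : List Char} {ch : Char} (h : ch ∉ cs) : pvOcc cs ch = [] := by
  induction cs with
  | nil => rfl
  | cons a t ih =>
    simp only [List.mem_cons, not_or] at h
    have ha : a ≠ ch := fun hh => h.1 hh.symm
    simp [pvOcc, ha, ih h.2]

theorem pvOcc_shift {cs : List Char} {ch : Char} {k : Nat} (hk : k < cs.length)
    (hne : cs[k]? ≠ some ch) :
    (pvOcc (cs.drop k) ch).map (· + k) = (pvOcc (cs.drop (k + 1)) ch).map (· + (k + 1)) := by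
  rw [List.drop_eq_getElem_cons hk]
  have hak : cs[k] ≠ ch := by intro h; exact hne (by simp [List.getElem?_eq_getElem hk, h])
  simp [pvOcc, hak, List.map_map]
  intros; omega

theorem pvOcc_hit {cs : List Char} {ch : Char} {k : Nat} (hk : k < cs.length)
    (heq : cs[k]? = some ch) :
    (pvOcc (cs.drop k) ch).map (· + k)
      = k :: (pvOcc (cs.drop (k + 1)) ch).map (· + (k + 1)) := by
  rw [List.drop_eq_getElem_cons hk]
  have hak : cs[k] = ch := by simpa [List.getElem?_eq_getElem hk] using heq
  simp [pvOcc, hak, List.map_map]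
  intros; omega

theorem pvOcc_range (cs : List Char) (ch : Char) :
    ∀ (m k : Nat), k + m ≤ cs.length → (∀ i, k ≤ i → i < k + m → cs[i]? ≠ some ch) →
    (pvOcc (cs.drop k) ch).map (· + k) = (pvOcc (cs.drop (k + m)) ch).map (· + (k + m)) := by
  intro m
  induction m with
  | zero => intro k _ _; rfl
  | succ m ih =>
    intro k hlen hno
    rw [pvOcc_shift (by omega) (hno k (le_refl k) (by omega))]
    have hh := ih (k + 1) (by omega) (fun i h1 h2 => hno i (by omega) (by omega))
    have hkm : k + 1 + m = k + (m + 1) := by omega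
    rw [hh, hkm]

theorem pvFindAllGo_spec (w : String) (ch : Char) :
    ∀ n : Nat, ∀ (k : Nat) (out : List Int) (fuel : Nat),
      k ≤ w.toList.length → w.toList.length - k = n → n + 1 ≤ fuel →
      pvFindAllGo w (String.singleton ch) fuel
          (PySem.Chars.findFrom w.toList [ch] (k : Int) none) out
        = out ++ ((pvOcc (w.toList.drop k) ch).map (· + k)).map (fun (j : Nat) => (j : Int)) := by
  intro n
  induction n using Nat.strong_induction_on with
  | _ n ih =>
    intro k out fuel hk hn hf
    obtain ⟨fuel, rfl⟩ : ∃ f', fuel = f' + 1 := ⟨fuel - 1, by omega⟩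
    set r := PySem.Chars.findFrom w.toList [ch] (k : Int) none with hr
    by_cases hneg : r = -1
    · have hni : ¬ [ch] <:+: w.toList.drop k :=
        (PySem.Chars.findFrom_natCast_eq_neg_one_iff w.toList [ch] k hk).mp hneg
      have hmem : ch ∉ w.toList.drop k := fun h => hni ((List.singleton_infix_iff ch _).mpr h)
      rw [pvFindAllGo]
      simp [hneg, pvOcc_nil_of_not_mem hmem]
    · obtain ⟨hkr, hpre, hmin⟩ :=
        PySem.Chars.findFrom_natCast_spec w.toList [ch] k hk hneg
      have h0r : (0 : Int) ≤ r := le_trans (by exact_mod_cast Nat.zero_le k) hkr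
      have hget : w.toList[r.toNat]? = some ch := (pvPrefix_drop _ _ _).mp hpre
      have hrlen : r.toNat < w.toList.length := by
        by_contra hcon
        rw [List.getElem?_eq_none (by omega)] at hget
        simp at hget
      have hkrn : k ≤ r.toNat := by omega
      have hrange := pvOcc_range w.toList ch (r.toNat - k) k (by omega)
        (fun i h1 h2 => fun hc => hmin i h1 (by omega) ((pvPrefix_drop _ _ _).mpr hc))
      have hrk : k + (r.toNat - k) = r.toNat := by omega
      rw [hrk] at hrange
      have hhit := pvOcc_hit hrlen hget
      rw [pvFindAllGo]
      simp only [if_neg hneg]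
      have hcast : r + 1 = ((r.toNat + 1 : Nat) : Int) := by omega
      have hsub : (String.singleton ch).toList = [ch] := by simp
      have hstep : PySem.Str.findFrom w (String.singleton ch) (r + 1) none
          = PySem.Chars.findFrom w.toList [ch] ((r.toNat + 1 : Nat) : Int) none := by
        rw [PySem.Str.findFrom_eq, hsub, hcast]
      rw [hstep,
        ih (w.toList.length - (r.toNat + 1)) (by omega) (r.toNat + 1) (out ++ [r]) fuel
          (by omega) rfl (by omega),
        List.append_assoc]
      congr 1
      rw [hrange, hhit]
      simp only [List.map_cons, List.singleton_append]
      congr 1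
      omega

theorem pvFindAll_singleton (w : String) (ch : Char) :
    pvFindAll w (String.singleton ch) = (pvOcc w.toList ch).map (fun (j : Nat) => (j : Int)) := by
  rw [pvFindAll]
  have hsub : (String.singleton ch).toList = [ch] := by simp
  have hfind : PySem.Str.find w (String.singleton ch)
      = PySem.Chars.findFrom w.toList [ch] ((0 : Nat) : Int) none := by
    simp [PySem.Chars.findFrom_zero]
  rw [hfind, pvFindAllGo_spec w ch w.toList.length 0 [] (w.toList.length + 2)
    (Nat.zero_le _) (by omega) (by omega)]
  simp

theorem mem_pvLetset (ws : List String) (x : String) :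
    x ∈ pvLetset ws ↔ ∃ w ∈ ws, ∃ ch ∈ w.toList, x = String.singleton ch := by
  suffices h : ∀ s : PySem.Set String,
      x ∈ ws.foldl (fun s w => PySem.Set.update s (w.toList.map (fun ch => String.singleton ch))) s
        ↔ x ∈ s ∨ ∃ w ∈ ws, ∃ ch ∈ w.toList, x = String.singleton ch by
    have := h PySem.Set.empty
    simpa [pvLetset, PySem.Set.empty] using this
  induction ws with
  | nil => intro s; simp
  | cons w ws ih =>
    intro s
    rw [List.foldl_cons, ih, PySem.Set.update_map_eq_foldl_add, PySem.Set.mem_foldl_add]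
    simp only [List.mem_cons]
    constructor
    · rintro (⟨hx | ⟨ch, hch, rfl⟩⟩ | ⟨w', hw', ch, hch, rfl⟩)
      · exact Or.inl hx
      · exact Or.inr ⟨w, Or.inl rfl, ch, hch, rfl⟩
      · exact Or.inr ⟨w', Or.inr hw', ch, hch, rfl⟩
    · rintro (hx | ⟨w', hw' | hw', ch, hch, rfl⟩)
      · exact Or.inl (Or.inl hx)
      · subst hw'; exact Or.inl (Or.inr ⟨ch, hch, rfl⟩)
      · exact Or.inr ⟨w', hw', ch, hch, rfl⟩

theorem pvFilterBy_eq (sw : String) (ws : List String) (ch : Char) :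
    pvFilterBy sw ws (String.singleton ch)
      = ws.filter (fun w => pvSig w (String.singleton ch) = pvSig sw (String.singleton ch)) := by
  simp only [pvFilterBy]
  have hfun : (fun (out : List String) w =>
        if pvFindAll sw (String.singleton ch) = pvFindAll w (String.singleton ch)
        then out ++ [w] else out)
      = (fun out w =>
        if (fun w => decide (pvFindAll sw (String.singleton ch) = pvFindAll w (String.singleton ch))) w = true
        then out ++ [(fun (w : String) => w) w] else out) := by
    funext out w; simp
  rw [hfun, PySem.List.foldl_append_if, List.map_id', List.nil_append]
  apply List.filter_congr
  intro w _
  rw [pvFindAll_singleton, pvFindAll_singleton, pvSig_singleton, pvSig_singleton]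
  simp only [decide_eq_decide]
  exact eq_comm

theorem pvGSS_len_one {sw : String} {words glist : List String} (h : words.length = 1) :
    pvGSS sw words glist = 0 := by
  rw [pvGSS]; simp [h]

theorem pvGSS_nil {sw : String} {words : List String} : pvGSS sw words [] = 0 := by
  rw [pvGSS]; split
  · rfl
  · simp [pvSearch]

theorem pvGSS_char (sw : String) (words glist : List String) :
    pvGSS sw words glist =
      if words.length = 1 then 0
      else
        match pvSearch glist (pvLetset words) with
        | none => 0
        | some i =>
          (if PySem.Str.isIn (glist.getD i "") sw then 0 else 1)
            + pvGSS sw (pvFilterBy sw words (glist.getD i "")) (glist.drop (i + 1)) := by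
  rw [pvGSS]
  by_cases h : words.length = 1
  · simp [h]
  · simp only [if_neg h]
    cases hs : pvSearch glist (pvLetset words) with
    | none => simp
    | some i =>
      have hcast : ((i : Nat) : Int) + 1 = ((i + 1 : Nat) : Int) := by push_cast; ring
      simp only [hcast, PySem.List.slice_from_natCast, PySem.List.pyGetD_natCast]

theorem pvGSS_cons_skip {sw : String} {words : List String} {c : String} {rest : List String}
    (h1 : words.length ≠ 1)
    (h2 : PySem.Set.contains (pvLetset words) c = false) :
    pvGSS sw words (c :: rest) = pvGSS sw words rest := by
  rw [pvGSS_char sw words (c :: rest), pvGSS_char sw words rest]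
  simp only [if_neg h1]
  have hsc : pvSearch (c :: rest) (pvLetset words)
      = (pvSearch rest (pvLetset words)).map (· + 1) := by
    rw [pvSearch]
    rw [if_neg (by rw [h2]; simp)]
  rw [hsc]
  cases hs : pvSearch rest (pvLetset words) with
  | none => simp
  | some j =>
    simp only [Option.map_some]
    rfl

theorem pvGSS_cons_hit {sw : String} {words : List String} {c : String} {rest : List String}
    (h1 : words.length ≠ 1)
    (h2 : PySem.Set.contains (pvLetset words) c = true) :
    pvGSS sw words (c :: rest)
      = (if PySem.Str.isIn c sw then 0 else 1) + pvGSS sw (pvFilterBy sw words c) rest := by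
  rw [pvGSS_char sw words (c :: rest)]
  simp only [if_neg h1]
  have hsc : pvSearch (c :: rest) (pvLetset words) = some 0 := by
    rw [pvSearch]
    rw [if_pos (by rw [h2])]
  rw [hsc]
  rfl

theorem pvLoop_eq (sel : String) (glist : List String) :
    ∀ cands mist, pvLoop sel glist cands mist = mist + pvGSS sel cands glist := by
  induction glist with
  | nil => intro cands mist; simp [pvLoop, pvGSS_nil]
  | cons c rest ih =>
    intro cands mist
    rw [pvLoop]
    by_cases h1 : cands.length = 1
    · simp [h1, pvGSS_len_one h1]
    · simp only [if_neg h1]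
      have hset : PySem.Set.contains
            (PySem.Set.ofList (cands.flatMap (fun w => w.toList.map (fun ch => String.singleton ch)))) c
          = PySem.Set.contains (pvLetset cands) c := by
        have hiff : PySem.Set.contains
              (PySem.Set.ofList (cands.flatMap (fun w => w.toList.map (fun ch => String.singleton ch)))) c = true
            ↔ PySem.Set.contains (pvLetset cands) c = true := by
          rw [PySem.Set.contains_iff, PySem.Set.contains_iff, PySem.Set.mem_ofList, mem_pvLetset]
          simp only [List.mem_flatMap, List.mem_map]
          constructor
          · rintro ⟨w, hw, ch, hch, rfl⟩; exact ⟨w, hw, ch, hch, rfl⟩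
          · rintro ⟨w, hw, ch, hch, rfl⟩; exact ⟨w, hw, ch, hch, rfl⟩
        cases hb1 : PySem.Set.contains
            (PySem.Set.ofList (cands.flatMap (fun w => w.toList.map (fun ch => String.singleton ch)))) c
          <;> cases hb2 : PySem.Set.contains (pvLetset cands) c <;> simp_all
      by_cases hc : PySem.Set.contains (pvLetset cands) c = true
      · rw [if_neg (by rw [hset, hc]; simp)]
        have hmem : c ∈ pvLetset cands := (PySem.Set.contains_iff _ _).mp hc
        obtain ⟨w0, _hw0, ch, _hch, rfl⟩ := (mem_pvLetset cands _).mp hmem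
        rw [ih, ← pvFilterBy_eq, pvGSS_cons_hit h1 hc]
        ring
      · have hcf : PySem.Set.contains (pvLetset cands) c = false := by
          cases hb : PySem.Set.contains (pvLetset cands) c
          · rfl
          · exact absurd hb hc
        rw [if_pos (by rw [hset, hcf]; simp)]
        rw [ih, pvGSS_cons_skip h1 hcf]

theorem pvGSS_nonneg_aux : ∀ (n : Nat) (sw : String) (words glist : List String),
    glist.length ≤ n → 0 ≤ pvGSS sw words glist := by
  intro n
  induction n with
  | zero =>
    intro sw words glist hg
    have h0 : glist = [] := List.eq_nil_of_length_eq_zero (by omega)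
    subst h0; rw [pvGSS_nil]
  | succ n ih =>
    intro sw words glist hg
    rw [pvGSS_char]
    by_cases h : words.length = 1
    · simp [h]
    · simp only [if_neg h]
      cases hs : pvSearch glist (pvLetset words) with
      | none => exact le_refl _
      | some i =>
        have hi := pvSearch_lt hs
        have hrec := ih sw (pvFilterBy sw words (glist.getD i ""))
          (glist.drop (i + 1)) (by simp [List.length_drop]; omega)
        have hmis : (0 : Int) ≤ if PySem.Str.isIn (glist.getD i "") sw then 0 else 1 := by
          split <;> omega
        exact add_nonneg hmis hrec

theorem pvGSS_nonneg (sw : String) (words glist : List String) : 0 ≤ pvGSS sw words glist :=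
  pvGSS_nonneg_aux glist.length sw words glist (le_refl _)

theorem pvGetGuesses_eq (words glist : List String) (sel : String) :
    pvGetGuesses sel words glist = pvGuesses words glist sel := by
  rw [pvGetGuesses, pvGuesses]
  have hfun : (fun (out : List String) w =>
        if PySem.Str.len w = PySem.Str.len sel then out ++ [w] else out)
      = (fun out w =>
        if (fun w => decide (PySem.Str.len w = PySem.Str.len sel)) w = true
        then out ++ [(fun (w : String) => w) w] else out) := by
    funext out w; simp
  rw [hfun, PySem.List.foldl_append_if, List.map_id', List.nil_append, pvLoop_eq, zero_add]

def pvStep (f : String → Int) (acc : Option String) (x : String) : Option String :=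
  match acc with
  | none => some x
  | some m => if f m < f x then some x else some m

theorem pvMax?_eq_foldl (xs : List String) (f : String → Int) :
    PySem.List.max? xs f = xs.foldl (pvStep f) none := by
  unfold PySem.List.max?
  congr 1
  funext acc x
  cases acc <;> rfl

theorem pvFold_max (f : String → Int) (ws : List String) (m : String) :
    ws.foldl (pvStep f) (some m)
      = some ((ws.foldl (fun st w => if st.1 < f w then (f w, w) else st) (f m, m)).2) := by
  induction ws generalizing m with
  | nil => rfl
  | cons w ws ih =>
    simp only [List.foldl_cons, pvStep]
    by_cases h : f m < f w
    · simp only [if_pos h]; exact ih w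
    · simp only [if_neg h]; exact ih m

-- ===== VERDICT (by name: the statement is the Claim_ definition above) =====
theorem get_killa_word_spec : Claim_equal_get_killa_word := by
  intro words glist _hdom _hpre
  show get_killa_word words glist = get_killa_word_alt words glist
  cases words with
  | nil => rfl
  | cons w ws =>
    rw [get_killa_word, get_killa_word_alt]
    have hkey : (fun (st : Int × String) x =>
        let guesses := pvGetGuesses x (w :: ws) glist;
        if st.1 < guesses then (guesses, x) else st)
        = (fun (st : Int × String) x =>
            if st.1 < pvGuesses (w :: ws) glist x then (pvGuesses (w :: ws) glist x, x) else st) := by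
      funext st x; simp only [pvGetGuesses_eq]
    rw [hkey]
    have hw0 : 0 ≤ pvGuesses (w :: ws) glist w := by
      rw [pvGuesses, pvLoop_eq, zero_add]; exact pvGSS_nonneg _ _ _
    simp only [List.isEmpty_cons, if_false, Bool.false_eq_true]
    rw [pvMax?_eq_foldl]
    simp only [List.foldl_cons]
    rw [if_pos (by simp only []; omega : ((-1 : Int), ("" : String)).1 < pvGuesses (w :: ws) glist w)]
    rw [show pvStep (pvGuesses (w :: ws) glist) none w = some w from rfl]
    rw [pvFold_max (pvGuesses (w :: ws) glist) ws w]
    rfl
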